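-- pv_equiv track=rewrite | github.com/arcrystal/ChessEngine | tests/parse_chess_moves.py | generate_test_code
-- ===== SOURCE A (Python) =====
-- def generate_test_code(moves):
--     output = []
--     output.append("    simulate_moves(new_game, [")
--     for i, move in enumerate(moves):
--         if i%2==0:
--             output.append(f"        {move},")
--         else:
--             output[-1] += f" {move},"
--     output.append("    ])")
--     return "\n".join(output)
-- ===== SOURCE B (Python) =====
-- def generate_test_code(moves):
--     lines = ["    simulate_moves(new_game, ["]
--     for i in range(0, len(moves), 2):
--         if i + 1 < len(moves):
--             lines.append(f"        {moves[i]}, {moves[i+1]},")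
--         else:
--             lines.append(f"        {moves[i]},")
--     lines.append("    ])")
--     return "\n".join(lines)
-- ===== Notes on version B (the rewrite author's own statement) =====
-- stated objective: simpler
-- what changed: B groups the moves into consecutive pairs (index loop with step 2) and emits each output line fully formed, replacing A's per-move parity branch that mutates the previously appended line via output[-1] +=.
import Mathlib
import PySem

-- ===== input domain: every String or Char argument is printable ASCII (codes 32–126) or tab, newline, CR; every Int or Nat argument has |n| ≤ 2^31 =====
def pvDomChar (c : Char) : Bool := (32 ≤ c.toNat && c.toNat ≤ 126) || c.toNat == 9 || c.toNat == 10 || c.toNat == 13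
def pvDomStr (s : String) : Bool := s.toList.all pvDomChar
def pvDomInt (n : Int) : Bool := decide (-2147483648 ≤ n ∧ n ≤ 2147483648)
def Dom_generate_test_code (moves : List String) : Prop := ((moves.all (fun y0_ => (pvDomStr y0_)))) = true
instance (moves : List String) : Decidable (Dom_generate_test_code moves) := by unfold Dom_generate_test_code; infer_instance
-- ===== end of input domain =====

-- B groups the moves into consecutive pairs and emits one finished line per pair
-- (decomposition change only; same cost); objective: simpler.

-- ===== PORT A =====
-- Python's `output[-1] += s` (output is nonempty at every call site of A's loop)
def pvLastAdd (output : List String) (s : String) : List String :=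
  output.dropLast ++ [output.getLastD "" ++ s]

-- the `for i, move in enumerate(moves)` loop, carrying the index i and the output list
def pvALoop (i : Nat) (output : List String) : List String → List String
  | [] => output
  | move :: rest =>
      if i % 2 == 0 then
        pvALoop (i + 1) (output ++ ["        " ++ move ++ ","]) rest
      else
        pvALoop (i + 1) (pvLastAdd output (" " ++ move ++ ",")) rest

def generate_test_code (moves : List String) : String :=
  PySem.Str.join "\n" (pvALoop 0 ["    simulate_moves(new_game, ["] moves ++ ["    ])"])

-- ===== PORT B =====
-- the `for i in range(0, len(moves), 2)` loop of Source B: one output line per chunk of two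
def pvPairLines : List String → List String
  | [] => []
  | [a] => ["        " ++ a ++ ","]
  | a :: b :: rest => ("        " ++ a ++ ", " ++ b ++ ",") :: pvPairLines rest

def generate_test_code_alt (moves : List String) : String :=
  PySem.Str.join "\n" (("    simulate_moves(new_game, [" :: pvPairLines moves) ++ ["    ])"])

-- ===== PRECONDITION & SPEC =====
def Spec_generate_test_code (moves : List String) (out : String) : Prop := out = generate_test_code_alt moves
instance (moves : List String) (out : String) : Decidable (Spec_generate_test_code moves out) := by unfold Spec_generate_test_code; infer_instance

-- ===== CLAIM (what is proved, stated in full; the proofs are below) =====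
def Claim_equal_generate_test_code : Prop := ∀ (moves : List String), Dom_generate_test_code moves → Spec_generate_test_code moves (generate_test_code moves)

-- ===== LEMMAS AND PROOFS =====
theorem pvCat (a b : String) :
    ("        " ++ a ++ ",") ++ (" " ++ b ++ ",") = "        " ++ a ++ ", " ++ b ++ "," := by
  simp only [String.append_assoc]
  rfl

theorem pvALoop_eq (ms : List String) :
    ∀ (out : List String) (i : Nat), i % 2 = 0 → pvALoop i out ms = out ++ pvPairLines ms := by
  induction ms using pvPairLines.induct with
  | case1 => intro out i _; simp [pvALoop, pvPairLines]
  | case2 a => intro out i hi; simp [pvALoop, pvPairLines, hi]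
  | case3 a b rest ih =>
      intro out i hi
      have h2 : (i + 1) % 2 = 1 := by omega
      have k1 : (i % 2 == 0) = true := by simp [hi]
      have k2 : ((i + 1) % 2 == 0) = false := by simp [h2]
      have hLast : ∀ (xs : List String) (x s : String),
          pvLastAdd (xs ++ [x]) s = xs ++ [x ++ s] := by
        intro xs x s; simp [pvLastAdd]
      rw [pvALoop, if_pos k1, pvALoop, if_neg (by simp [k2]), hLast,
          ih _ (i + 1 + 1) (by omega), pvCat]
      simp [pvPairLines]

-- ===== VERDICT (by name: the statement is the Claim_ definition above) =====
theorem generate_test_code_spec : Claim_equal_generate_test_code := by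
  intro moves _
  unfold Spec_generate_test_code generate_test_code generate_test_code_alt
  rw [pvALoop_eq moves _ 0 rfl]
  rfl
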